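-- pv_equiv track=rewrite | github.com/AryanJha-4903/Coding-Projects | jumping on clouds revisited hackerrank easy.py | jumping_on_cloud
-- ===== SOURCE A (Python) =====
-- def jumping_on_cloud(clouds,jump_size):
--    energy=100
--    i=0
--    while True:
--        energy-=1
--        pos=(i+jump_size)%len(clouds)
--        i=pos
--        if clouds[i]==1:
--            energy-=2
--        if i==0:
--            return energy
-- ===== SOURCE B (Python) =====
-- def jumping_on_cloud(clouds, jump_size):
--     n = len(clouds)
--     r = jump_size % n
--     g = n
--     b = r
--     while b:
--         g, b = b, g % b
--     k = n // g
--     return 100 - k - 2 * sum(1 for p in range(0, n, g) if clouds[p] == 1)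
-- ===== Notes on version B (the rewrite author's own statement) =====
-- stated objective: alternative
-- what changed: Replaces the step-by-step cyclic simulation with number theory: g = gcd(n, jump_size % n) determines the set of visited positions as exactly the multiples of g, so B counts the n//g visited clouds in one ascending pass over range(0, n, g) instead of simulating jumps.
import Mathlib
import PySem

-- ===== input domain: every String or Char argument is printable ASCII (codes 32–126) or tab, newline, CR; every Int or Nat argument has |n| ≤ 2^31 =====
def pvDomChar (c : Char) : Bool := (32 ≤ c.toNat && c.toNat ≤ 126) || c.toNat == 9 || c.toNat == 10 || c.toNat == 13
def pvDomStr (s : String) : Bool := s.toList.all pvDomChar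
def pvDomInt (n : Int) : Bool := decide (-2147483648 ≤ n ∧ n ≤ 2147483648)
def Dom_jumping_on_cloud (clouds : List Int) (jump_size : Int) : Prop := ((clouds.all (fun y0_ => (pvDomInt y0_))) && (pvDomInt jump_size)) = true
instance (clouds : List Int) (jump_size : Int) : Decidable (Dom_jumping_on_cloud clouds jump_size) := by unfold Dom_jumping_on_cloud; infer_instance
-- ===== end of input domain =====

-- B replaces A's step-by-step jump simulation by the gcd closed form: the visited
-- positions are exactly the multiples of g = gcd(n, jump_size % n), scanned once in
-- ascending order; same return value on every non-empty clouds list.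


-- ===== PORT A =====
-- the 'while True' loop; it returns within clouds.length iterations (proved below),
-- so fuel = clouds.length is a pure totality guard, never exhausted on Pre_ inputs.
-- clouds[i] is ported as pyGetD: the index (i+jump_size) % len(clouds) is always in range.
def jumpLoopA (clouds : List Int) (jump_size : Int) : Nat → Int → Int → Int
  | 0, energy, _ => energy
  | fuel+1, energy, i =>
      let energy1 := energy - 1
      let pos := PySem.Int.mod (i + jump_size) (clouds.length : Int)
      let energy2 := if PySem.List.pyGetD clouds pos 0 = 1 then energy1 - 2 else energy1
      if pos = 0 then energy2 else jumpLoopA clouds jump_size fuel energy2 pos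

def jumping_on_cloud (clouds : List Int) (jump_size : Int) : Int :=
  jumpLoopA clouds jump_size clouds.length 100 0

-- ===== PORT B =====
-- the hand-written Euclid loop 'while b: g, b = b, g % b' of Source B
def gcdLoop : Nat → Nat → Nat
  | g, 0 => g
  | g, b+1 => gcdLoop (b+1) (g % (b+1))
termination_by _g b => b
decreasing_by exact Nat.mod_lt _ (Nat.succ_pos _)

-- clouds[p] is ported as pyGetD: every p in range(0, n, g) is in range.
def jumping_on_cloud_alt (clouds : List Int) (jump_size : Int) : Int :=
  let n := clouds.length
  let r := PySem.Int.mod jump_size (n : Int)   -- r ≥ 0 since n > 0 on Pre_ inputs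
  let g := gcdLoop n r.toNat
  let k := n / g
  (100 : Int) - (k : Int) - 2 *
    ((PySem.List.pyRange 0 (n : Int) (g : Int)).foldl
      (fun acc p => if PySem.List.pyGetD clouds p 0 = 1 then acc + 1 else acc) 0)

-- ===== PRECONDITION & SPEC =====
-- Pre_ excludes only the empty clouds list, on which A (and B) raise ZeroDivisionError.
def Pre_jumping_on_cloud (clouds : List Int) (jump_size : Int) : Prop := clouds ≠ []
instance (clouds : List Int) (jump_size : Int) : Decidable (Pre_jumping_on_cloud clouds jump_size) := by unfold Pre_jumping_on_cloud; infer_instance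
def pvWitness_jumping_on_cloud : List Int × Int := ([1, 0, 1, 0], 3)

def Spec_jumping_on_cloud (clouds : List Int) (jump_size : Int) (out : Int) : Prop := out = jumping_on_cloud_alt clouds jump_size
instance (clouds : List Int) (jump_size : Int) (out : Int) : Decidable (Spec_jumping_on_cloud clouds jump_size out) := by unfold Spec_jumping_on_cloud; infer_instance

-- ===== CLAIM (what is proved, stated in full; the proofs are below) =====
def Claim_equal_jumping_on_cloud : Prop := ∀ (clouds : List Int) (jump_size : Int), Dom_jumping_on_cloud clouds jump_size → Pre_jumping_on_cloud clouds jump_size → Spec_jumping_on_cloud clouds jump_size (jumping_on_cloud clouds jump_size)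

-- ===== LEMMAS AND PROOFS =====

lemma gcdLoop_eq (a b : Nat) : gcdLoop a b = Nat.gcd b a := by
  induction b using Nat.strong_induction_on generalizing a with
  | _ b ih =>
    match b with
    | 0 => rw [gcdLoop]; simp
    | b+1 =>
      rw [gcdLoop, ih (a % (b+1)) (Nat.mod_lt _ (Nat.succ_pos _)) (b+1), Nat.gcd_succ]

-- n ∣ j * r  ↔  (n / gcd n r) ∣ j   (the additive order of r in Z/n)
lemma key_dvd (n r : Nat) (hn : 0 < n) (j : Nat) :
    n ∣ j * r ↔ (n / Nat.gcd n r) ∣ j := by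
  set d := Nat.gcd n r with hdgcd
  have hg : 0 < d := Nat.gcd_pos_of_pos_left _ hn
  have hcop : (n / d).Coprime (r / d) := Nat.coprime_div_gcd_div_gcd hg
  obtain ⟨nn, hnn⟩ : d ∣ n := Nat.gcd_dvd_left n r
  obtain ⟨rr, hrr⟩ : d ∣ r := Nat.gcd_dvd_right n r
  have hdn : n / d = nn := by rw [hnn]; exact Nat.mul_div_cancel_left _ hg
  have hdr : r / d = rr := by rw [hrr]; exact Nat.mul_div_cancel_left _ hg
  rw [hdn]
  rw [hdn, hdr] at hcop
  constructor
  · intro h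
    have h2 : d * nn ∣ d * (j * rr) := by
      rw [← hnn, show d * (j * rr) = j * r by rw [hrr]; ring]; exact h
    exact hcop.dvd_of_dvd_mul_right ((Nat.mul_dvd_mul_iff_left hg).mp h2)
  · rintro ⟨m, rfl⟩
    exact ⟨m * rr, by rw [hnn, hrr]; ring⟩

lemma jumpLoopA_eq (clouds : List Int) (jump_size : Int) (n r k : Nat)
    (hnl : clouds.length = n) (hn : 0 < n)
    (hr : PySem.Int.mod jump_size (n : Int) = (r : Int))
    (hkey : ∀ j, n ∣ j * r ↔ k ∣ j) :
    ∀ (fuel s : Nat) (e : Int), s < k → k ≤ s + fuel →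
    jumpLoopA clouds jump_size fuel e ((s * r % n : Nat) : Int) =
      e - ((k - s : Nat) : Int) - 2 *
        (((List.range' (s+1) (k - s)).map (fun j => j * r % n)).countP
          (fun p => decide (clouds.getD p 0 = 1)) : Int) := by
  have hnpos : (0 : Int) < (n : Int) := by exact_mod_cast hn
  have hjr : jump_size % (n : Int) = (r : Int) := by
    rw [← PySem.Int.mod_eq_emod_of_pos hnpos, hr]
  have hstep : ∀ s : Nat,
      PySem.Int.mod (((s * r % n : Nat) : Int) + jump_size) (n : Int) =
        (((s + 1) * r % n : Nat) : Int) := by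
    intro s
    rw [PySem.Int.mod_eq_emod_of_pos hnpos, Int.add_emod, hjr]
    have hnat : (s * r % n + r) % n = (s + 1) * r % n := by
      rw [Nat.mod_add_mod, Nat.succ_mul]
    rw [← hnat]
    push_cast
    rw [Int.emod_emod_of_dvd _ dvd_rfl]
  intro fuel
  induction fuel with
  | zero => intro s e hs hf; omega
  | succ f ih =>
    intro s e hs hf
    have hiff : (s + 1) * r % n = 0 ↔ s + 1 = k := by
      rw [Iff.symm Nat.dvd_iff_mod_eq_zero, hkey]
      constructor
      · intro h; exact Nat.le_antisymm (by omega) (Nat.le_of_dvd (Nat.succ_pos _) h)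
      · intro h; rw [h]
    simp only [jumpLoopA]
    rw [hnl, hstep s, PySem.List.pyGetD_natCast]
    by_cases hsk : s + 1 = k
    · have h0 : (s + 1) * r % n = 0 := hiff.mpr hsk
      rw [h0]
      rw [if_pos (by norm_num), show k - s = 1 by omega, List.range'_one]
      simp only [List.map, List.countP_cons, List.countP_nil, h0, decide_eq_true_eq]
      split_ifs with h <;> push_cast <;> omega
    · have hne : ¬ (((s + 1) * r % n : Nat) : Int) = 0 := by
        exact_mod_cast fun h => hsk (hiff.mp (by exact_mod_cast h))
      rw [if_neg hne]
      rw [ih (s + 1) _ (by omega) (by omega)]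
      have hrange : List.range' (s + 1) (k - s) = (s + 1) :: List.range' (s + 1 + 1) (k - (s + 1)) := by
        rw [show k - s = (k - (s + 1)) + 1 by omega, List.range'_succ]
      rw [hrange]
      simp only [List.map, List.countP_cons, decide_eq_true_eq]
      split_ifs with h <;> push_cast <;> omega

lemma orbit_perm (n r k g : Nat) (hn : 0 < n) (hg : g = Nat.gcd n r) (hk : k = n / g)
    (hkey : ∀ j, n ∣ j * r ↔ k ∣ j) :
    ((List.range' 1 k).map (fun j => j * r % n)).Perm
      ((List.range k).map (fun m => m * g)) := by
  subst hg hk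
  set g := Nat.gcd n r with hgdef
  set k := n / g with hkdef
  have hgn : g ∣ n := Nat.gcd_dvd_left n r
  have hgr : g ∣ r := Nat.gcd_dvd_right n r
  have hgpos : 0 < g := Nat.gcd_pos_of_pos_left _ hn
  have hkg : k * g = n := Nat.div_mul_cancel hgn
  have hkpos : 0 < k := by
    rcases Nat.eq_zero_or_pos k with h0 | h; · rw [h0] at hkg; omega
    · exact h
  -- injectivity on [1, k]
  have hinj : ∀ x ∈ List.range' 1 k, ∀ y ∈ List.range' 1 k,
      x * r % n = y * r % n → x = y := by
    have H : ∀ x y, 1 ≤ x → x < 1 + k → y < 1 + k → x ≤ y →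
        x * r % n = y * r % n → x = y := by
      intro x y hx1 _ hy2 hxy h
      have hle : x * r ≤ y * r := Nat.mul_le_mul_right _ hxy
      have hd : n ∣ y * r - x * r := (Nat.modEq_iff_dvd' hle).mp h
      rw [← Nat.sub_mul] at hd
      have hkd := (hkey (y - x)).mp hd
      rcases Nat.eq_zero_or_pos (y - x) with h0 | hpos
      · omega
      · have := Nat.le_of_dvd hpos hkd; omega
    intro x hx y hy h
    rw [List.mem_range'_1] at hx hy
    rcases le_total x y with hle | hle
    · exact H x y hx.1 hx.2 hy.2 hle h
    · exact (H y x hy.1 hy.2 hx.2 hle h.symm).symm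
  have hnodup : ((List.range' 1 k).map (fun j => j * r % n)).Nodup :=
    List.Nodup.map_on hinj (List.nodup_range' 1)
  have hsub : ((List.range' 1 k).map (fun j => j * r % n)) ⊆
      ((List.range k).map (fun m => m * g)) := by
    intro x hx
    simp only [List.mem_map, List.mem_range'_1] at hx
    obtain ⟨j, _, rfl⟩ := hx
    have hgx : g ∣ j * r % n := (Nat.dvd_mod_iff hgn).mpr (Dvd.dvd.mul_left hgr j)
    have hxlt : j * r % n < n := Nat.mod_lt _ hn
    simp only [List.mem_map, List.mem_range]
    refine ⟨j * r % n / g, ?_, Nat.div_mul_cancel hgx⟩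
    rw [Nat.div_lt_iff_lt_mul hgpos, hkg]
    exact hxlt
  exact (hnodup.subperm hsub).perm_of_length_le (by simp)

-- ===== VERDICT (by name: the statement is the Claim_ definition above) =====
theorem jumping_on_cloud_spec : Claim_equal_jumping_on_cloud := by
  intro clouds jump_size _dom hpre
  unfold Spec_jumping_on_cloud
  have hn : 0 < clouds.length := List.length_pos_iff.mpr hpre
  set n := clouds.length with hnl
  have hnpos : (0 : Int) < (n : Int) := by exact_mod_cast hn
  set rZ := PySem.Int.mod jump_size (n : Int) with hrZ
  have hrnn : 0 ≤ rZ := PySem.Int.mod_nonneg _ hnpos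
  set r := rZ.toNat with hrdef
  have hr : rZ = (r : Int) := (Int.toNat_of_nonneg hrnn).symm
  set g := Nat.gcd n r with hg
  have hgpos : 0 < g := Nat.gcd_pos_of_pos_left _ hn
  have hgn : g ∣ n := Nat.gcd_dvd_left _ _
  set k := n / g with hk
  have hkey : ∀ j, n ∣ j * r ↔ k ∣ j := by
    intro j; rw [hk, hg]; exact key_dvd n r hn j
  have hkpos : 0 < k := Nat.div_pos (Nat.le_of_dvd hn hgn) hgpos
  -- A side
  have hA : jumping_on_cloud clouds jump_size =
      100 - (k : Int) - 2 * (((List.range' 1 k).map (fun j => j * r % n)).countP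
        (fun p => decide (clouds.getD p 0 = 1)) : Int) := by
    unfold jumping_on_cloud
    rw [show (0 : Int) = (((0 : Nat) * r % n : Nat) : Int) by simp]
    rw [show clouds.length = n from rfl]
    rw [jumpLoopA_eq clouds jump_size n r k rfl hn hr hkey n 0 100 hkpos (by rw [hk]; exact le_trans (Nat.div_le_self n g) (by omega))]
    simp
  -- B side
  have hcnt : ((((n : Int) - 0 + (g : Int) - 1) / (g : Int)).toNat) = k := by
    obtain ⟨kk, hkk⟩ := hgn
    have h1 : ((n : Int) - 0 + (g : Int) - 1) = ((n + g - 1 : Nat) : Int) := by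
      omega
    rw [h1, ← Int.natCast_ediv, Int.toNat_natCast, hk, hkk]
    rw [Nat.mul_div_cancel_left _ hgpos]
    rw [show g * kk + g - 1 = (g - 1) + kk * g by rw [Nat.mul_comm g kk]; omega]
    rw [Nat.add_mul_div_right _ _ hgpos, Nat.div_eq_of_lt (by omega)]
    omega
  have hB : jumping_on_cloud_alt clouds jump_size =
      100 - (k : Int) - 2 * ((((List.range k).map (fun m => m * g)).countP
        (fun p => decide (clouds.getD p 0 = 1)) : Nat) : Int) := by
    unfold jumping_on_cloud_alt
    dsimp only
    rw [← hnl, ← hrZ, ← hrdef]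
    rw [show gcdLoop n r = g by rw [gcdLoop_eq, hg, Nat.gcd_comm]]
    rw [PySem.List.pyRange_of_pos 0 (n : Int) (by exact_mod_cast hgpos)]
    rw [if_pos hnpos, hcnt, List.foldl_map]
    have hfun : (fun (acc : Int) (kk : Nat) =>
        if PySem.List.pyGetD clouds ((0 : Int) + (g : Int) * (kk : Int)) 0 = 1 then acc + 1 else acc) =
        (fun (acc : Int) (kk : Nat) =>
          if (fun m => decide (clouds.getD (m * g) 0 = 1)) kk = true then acc + 1 else acc) := by
      funext acc kk
      rw [show ((0 : Int) + (g : Int) * (kk : Int)) = ((kk * g : Nat) : Int) by push_cast; ring,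
        PySem.List.pyGetD_natCast]
      simp
    rw [hfun, PySem.List.foldl_count_if, List.countP_map]
    simp only [zero_add, ← hk, Function.comp_def]
  rw [hA, hB]
  have hperm := orbit_perm n r k g hn hg hk hkey
  rw [hperm.countP_eq (fun p => decide (clouds.getD p 0 = 1))]
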